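-- pv_equiv track=rewrite | github.com/handanlinzhang/ss | ss.py | moralize
-- ===== SOURCE A (Python) =====
-- import copy
--
-- def moralize(bn):
--     """Construct the moral graph from bayesian network
--
--     :param bn: the adjacency matrix of bayesian network
--     :return: moral graph of the bayesian network
--     """
--     moral_graph = copy.deepcopy(bn)
--     parents=[]
--
--     for item in bn:
--         parents.append([idx for idx, i in enumerate(item) if i==1])
--     for item in parents:
--         for s in item:
--             for e in item:
--                 if s != e:
--                     moral_graph[s][e] = 1
--
--     return moral_graph
-- ===== SOURCE B (Python) =====
-- import copy
--
-- def moralize(bn):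
--     """Construct the moral graph from bayesian network (column-index formulation)."""
--     moral_graph = copy.deepcopy(bn)
--     cols = {}
--     for r, row in enumerate(bn):
--         for c, v in enumerate(row):
--             if v == 1:
--                 cols[c] = cols.get(c, []) + [r]
--     ks = list(cols)
--     for s in ks:
--         for e in ks:
--             if s != e and any(r in cols.get(e, []) for r in cols.get(s, [])):
--                 moral_graph[s][e] = 1
--     return moral_graph
-- ===== Notes on version B (the rewrite author's own statement) =====
-- stated objective: alternative
-- what changed: Instead of A's pass over rows that marries every ordered pair of parents of each row (re-marking the same pair once per row that shares it), B builds a column-to-occupied-rows index in one pass over the cells and then marks moral_graph[s][e] for the ordered pairs of occupied columns whose row sets intersect.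
import Mathlib
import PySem

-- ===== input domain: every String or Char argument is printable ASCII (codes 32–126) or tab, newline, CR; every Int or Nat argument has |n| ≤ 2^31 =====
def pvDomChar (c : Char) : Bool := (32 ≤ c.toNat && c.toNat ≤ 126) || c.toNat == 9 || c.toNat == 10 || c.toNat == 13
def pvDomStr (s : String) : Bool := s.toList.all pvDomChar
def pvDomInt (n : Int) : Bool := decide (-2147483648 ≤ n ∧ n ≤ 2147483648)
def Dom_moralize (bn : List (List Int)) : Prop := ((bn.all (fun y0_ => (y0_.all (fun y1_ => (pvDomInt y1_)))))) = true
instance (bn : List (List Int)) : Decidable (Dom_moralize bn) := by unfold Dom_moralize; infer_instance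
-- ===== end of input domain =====

-- B replaces A's per-row parent-marrying double loop by a column→rows occupancy
-- index (one pass over the cells) and an intersection test over column pairs
-- (objective: alternative decomposition, same return value).

-- ===== PORT A =====
-- moral_graph[s][e] = 1  (shared transliteration of the single Python statement both programs contain)
def setOne (mg : List (List Int)) (s e : Int) : List (List Int) :=
  PySem.List.pySetD mg s (PySem.List.pySetD (PySem.List.pyGetD mg s []) e 1)

def moralize (bn : List (List Int)) : List (List Int) :=
  let moral_graph := bn
  let parents := bn.map (fun item =>
    ((PySem.List.enumerate item 0).filter (fun p => p.2 == 1)).map (fun p => p.1))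
  parents.foldl (fun mg item =>
    item.foldl (fun mg s =>
      item.foldl (fun mg e => if s ≠ e then setOne mg s e else mg) mg) mg) moral_graph

-- ===== PORT B =====
-- cols[c] = cols.get(c, []) + [r]  grouping loop over the cells
def bnCols (bn : List (List Int)) : PySem.Dict Int (List Int) :=
  (PySem.List.enumerate bn 0).foldl (fun d rr =>
    (PySem.List.enumerate rr.2 0).foldl (fun d cv =>
      if cv.2 == 1 then d.modify cv.1 [] (fun l => l ++ [rr.1]) else d) d) PySem.Dict.empty

def moralize_alt (bn : List (List Int)) : List (List Int) :=
  let moral_graph := bn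
  let cols := bnCols bn
  let ks := cols.keys
  ks.foldl (fun mg s =>
    ks.foldl (fun mg e =>
      if s != e && (cols.getD s []).any (fun r => (cols.getD e []).contains r)
      then setOne mg s e else mg) mg) moral_graph

-- ===== PRECONDITION & SPEC =====
-- Pre_ excludes exactly the inputs on which the Python A raises IndexError: a pair of
-- distinct columns s,e both holding 1 in some row while moral_graph[s][e] is out of range
-- (only possible on non-square matrices).  Python B raises on exactly the same inputs.
def Pre_moralize (bn : List (List Int)) : Prop :=
  (bn.all (fun row =>
    (List.range row.length).all (fun s =>
      (List.range row.length).all (fun e =>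
        !(row.getD s 0 == 1 && row.getD e 0 == 1 && s != e) ||
          (decide (s < bn.length) && decide (e < (bn.getD s []).length)))))) = true
instance (bn : List (List Int)) : Decidable (Pre_moralize bn) := by unfold Pre_moralize; infer_instance

def pvWitness_moralize : List (List Int) := [[0, 1, 1], [0, 0, 0], [0, 0, 0]]

def Spec_moralize (bn : List (List Int)) (out : List (List Int)) : Prop := out = moralize_alt bn
instance (bn : List (List Int)) (out : List (List Int)) : Decidable (Spec_moralize bn out) := by unfold Spec_moralize; infer_instance

-- ===== CLAIM (what is proved, stated in full; the proofs are below) =====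
def Claim_equal_moralize : Prop := ∀ (bn : List (List Int)), Dom_moralize bn → Pre_moralize bn → Spec_moralize bn (moralize bn)

-- ===== LEMMAS AND PROOFS =====

-- the abstract write list: both programs are 'apply a batch of [s][e] := 1 writes to bn'
def applyAll (mg : List (List Int)) (W : List (Int × Int)) : List (List Int) :=
  W.foldl (fun mg p => setOne mg p.1 p.2) mg

def entry (m : List (List Int)) (r c : Nat) : Option Int := (m[r]?).bind (fun row => row[c]?)

def ones (row : List Int) : List Int :=
  ((PySem.List.enumerate row 0).filter (fun p => p.2 == 1)).map (fun p => p.1)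

def WA (bn : List (List Int)) : List (Int × Int) :=
  (bn.map ones).flatMap (fun item =>
    item.flatMap (fun s => (item.filter (fun e => decide (s ≠ e))).map (fun e => (s, e))))

def cells (bn : List (List Int)) : List (Int × Int) :=
  (PySem.List.enumerate bn 0).flatMap (fun rr => (ones rr.2).map (fun c => (c, rr.1)))

def WB (bn : List (List Int)) : List (Int × Int) :=
  let cols := bnCols bn
  cols.keys.flatMap (fun s =>
    (cols.keys.filter (fun e =>
      s != e && (cols.getD s []).any (fun r => (cols.getD e []).contains r))).map (fun e => (s, e)))

lemma length_setOne (mg : List (List Int)) (s e : Int) : (setOne mg s e).length = mg.length := by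
  simp [setOne, PySem.List.length_pySetD]

lemma length_applyAll (W : List (Int × Int)) (mg : List (List Int)) :
    (applyAll mg W).length = mg.length := by
  induction W generalizing mg with
  | nil => rfl
  | cons p W ih =>
    show (applyAll (setOne mg p.1 p.2) W).length = mg.length
    rw [ih, length_setOne]

lemma pyGetD_in (mg : List (List Int)) (s : Int) (hs : 0 ≤ s) (h : s.toNat < mg.length) :
    PySem.List.pyGetD mg s [] = mg[s.toNat] := by
  have h1 : s < (mg.length : Int) := by omega
  simp [PySem.List.pyGetD, PySem.List.pyGet?, PySem.List.pyIdx?, hs, h1]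

lemma setOne_eq_set (mg : List (List Int)) (s e : Int) (hs : 0 ≤ s) (he : 0 ≤ e) :
    setOne mg s e = mg.set s.toNat ((PySem.List.pyGetD mg s []).set e.toNat 1) := by
  rw [setOne, PySem.List.pySetD_of_nonneg _ _ he, PySem.List.pySetD_of_nonneg _ _ hs]

lemma entry_setOne (mg : List (List Int)) (s e : Int) (hs : 0 ≤ s) (he : 0 ≤ e) (r c : Nat) :
    entry (setOne mg s e) r c =
      if s = (r : Int) ∧ e = (c : Int) then (entry mg r c).map (fun _ => 1) else entry mg r c := by
  rw [entry, setOne_eq_set mg s e hs he]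
  by_cases hsr : s = (r : Int)
  · have hts : s.toNat = r := by omega
    by_cases hrl : r < mg.length
    · have hget : PySem.List.pyGetD mg s [] = mg[r] := by
        rw [pyGetD_in mg s hs (by omega)]
        congr 1
      rw [List.getElem?_set, if_pos hts]
      rw [if_pos (by omega : s.toNat < mg.length)]
      rw [hget, entry, List.getElem?_eq_getElem hrl]
      simp only [Option.bind_some]
      by_cases hec : e = (c : Int)
      · have htc : e.toNat = c := by omega
        rw [if_pos ⟨hsr, hec⟩, List.getElem?_set, if_pos htc, htc]
        by_cases hcl : c < (mg[r]).length
        · rw [if_pos hcl, List.getElem?_eq_getElem hcl]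
          simp
        · rw [if_neg hcl, List.getElem?_eq_none (by omega)]
          simp
      · have htc : e.toNat ≠ c := by omega
        rw [if_neg (by tauto), List.getElem?_set, if_neg htc]
    · rw [List.getElem?_set, if_pos hts, if_neg (by omega : ¬ s.toNat < mg.length)]
      rw [entry, List.getElem?_eq_none (by omega)]
      simp
  · have hts : s.toNat ≠ r := by omega
    rw [List.getElem?_set, if_neg hts, if_neg (by tauto), entry]

lemma entry_applyAll (W : List (Int × Int)) (hW : ∀ p ∈ W, 0 ≤ p.1 ∧ 0 ≤ p.2)
    (mg : List (List Int)) (r c : Nat) :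
    entry (applyAll mg W) r c =
      if ((r : Int), (c : Int)) ∈ W then (entry mg r c).map (fun _ => 1) else entry mg r c := by
  induction W generalizing mg with
  | nil => simp [applyAll]
  | cons p W ih =>
    obtain ⟨hp1, hp2⟩ := hW p (List.mem_cons_self ..)
    show entry (applyAll (setOne mg p.1 p.2) W) r c = _
    rw [ih (fun q hq => hW q (List.mem_cons_of_mem _ hq)), entry_setOne mg p.1 p.2 hp1 hp2 r c]
    by_cases h1 : ((r : Int), (c : Int)) ∈ W <;>
      by_cases h2 : p.1 = (r : Int) ∧ p.2 = (c : Int) <;>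
        simp [h1, h2, List.mem_cons, Prod.ext_iff, eq_comm] <;>
          cases entry mg r c <;> simp_all [Prod.ext_iff]

lemma mat_ext (m1 m2 : List (List Int)) (hlen : m1.length = m2.length)
    (hent : ∀ r c, entry m1 r c = entry m2 r c) : m1 = m2 := by
  apply List.ext_getElem?
  intro r
  by_cases hr : r < m1.length
  · have hr2 : r < m2.length := by omega
    rw [List.getElem?_eq_getElem hr, List.getElem?_eq_getElem hr2]
    have hrow : m1[r] = m2[r] := by
      apply List.ext_getElem?
      intro c
      have := hent r c
      rwa [entry, entry, List.getElem?_eq_getElem hr, List.getElem?_eq_getElem hr2,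
        Option.bind_some, Option.bind_some] at this
    rw [hrow]
  · rw [List.getElem?_eq_none (by omega), List.getElem?_eq_none (by omega)]

lemma mem_ones (row : List Int) (x : Int) :
    x ∈ ones row ↔ 0 ≤ x ∧ row[x.toNat]? = some 1 := by
  unfold ones
  simp only [List.mem_map, List.mem_filter, PySem.List.mem_enumerate_iff, beq_iff_eq]
  constructor
  · rintro ⟨p, ⟨⟨k, hk, rfl⟩, h1⟩, rfl⟩
    have h1' : row[k] = 1 := h1
    simp only [zero_add]
    refine ⟨by positivity, ?_⟩
    rw [Int.toNat_natCast, List.getElem?_eq_getElem hk, h1']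
  · rintro ⟨hx, hrow⟩
    obtain ⟨hk, hv⟩ := List.getElem?_eq_some_iff.1 hrow
    exact ⟨((x.toNat : Int), row[x.toNat]), ⟨⟨x.toNat, hk, by simp⟩, hv⟩, by omega⟩

lemma foldl_applyAll {α : Type} (w : α → List (Int × Int)) (xs : List α) (mg : List (List Int)) :
    xs.foldl (fun mg x => applyAll mg (w x)) mg = applyAll mg (xs.flatMap w) :=
  (List.foldl_flatMap ..).symm

lemma moralize_eq_applyAll (bn : List (List Int)) : moralize bn = applyAll bn (WA bn) := by
  have h1 : ∀ (item : List Int) (s : Int) (mg : List (List Int)),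
      item.foldl (fun mg e => if s ≠ e then setOne mg s e else mg) mg =
        applyAll mg ((item.filter (fun e => decide (s ≠ e))).map (fun e => (s, e))) := by
    intro item s mg
    rw [PySem.List.foldl_ite_eq_foldl_filter, applyAll, List.foldl_map]
  show (bn.map ones).foldl (fun mg item => item.foldl (fun mg s =>
      item.foldl (fun mg e => if s ≠ e then setOne mg s e else mg) mg) mg) bn = _
  simp only [h1, foldl_applyAll]
  rfl

lemma bnCols_eq (bn : List (List Int)) :
    bnCols bn = (cells bn).foldl (fun d p => d.modify p.1 [] (fun l => l ++ [p.2]))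
      PySem.Dict.empty := by
  have h1 : ∀ (rr : Int × List Int) (d : PySem.Dict Int (List Int)),
      (PySem.List.enumerate rr.2 0).foldl (fun d cv =>
          if cv.2 == 1 then d.modify cv.1 [] (fun l => l ++ [rr.1]) else d) d =
        ((ones rr.2).map (fun c => (c, rr.1))).foldl
          (fun d p => d.modify p.1 [] (fun l => l ++ [p.2])) d := by
    intro rr d
    rw [PySem.List.foldl_if_eq_foldl_filter, ones, List.foldl_map, List.foldl_map]
  show (PySem.List.enumerate bn 0).foldl (fun d rr =>
      (PySem.List.enumerate rr.2 0).foldl (fun d cv =>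
        if cv.2 == 1 then d.modify cv.1 [] (fun l => l ++ [rr.1]) else d) d) PySem.Dict.empty = _
  simp only [h1]
  rw [cells, List.foldl_flatMap]

lemma getD_bnCols (bn : List (List Int)) (c : Int) :
    (bnCols bn).getD c [] = ((cells bn).filter (fun p => p.1 == c)).map (fun p => p.2) := by
  rw [bnCols_eq, PySem.Dict.getD_foldl_modify_append, PySem.Dict.getD_empty]
  simp

lemma keys_bnCols (bn : List (List Int)) :
    (bnCols bn).keys = PySem.Set.ofList ((cells bn).map (fun p => p.1)) := by
  rw [bnCols_eq,
    PySem.Dict.keys_foldl_modify_key (cells bn) (fun p => p.1) []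
      (fun _ p l => l ++ [p.2]) PySem.Dict.empty]
  rw [PySem.Dict.keys_empty, PySem.Set.update_nil_left]

lemma mem_cells (bn : List (List Int)) (c x : Int) :
    (c, x) ∈ cells bn ↔ 0 ≤ x ∧ ∃ row, bn[x.toNat]? = some row ∧ c ∈ ones row := by
  unfold cells
  simp only [List.mem_flatMap, PySem.List.mem_enumerate_iff, List.mem_map]
  constructor
  · rintro ⟨rr, ⟨k, hk, rfl⟩, c', hc', hpair⟩
    simp only [Prod.mk.injEq, zero_add] at hpair hc'
    obtain ⟨rfl, hx⟩ := hpair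
    obtain rfl : x = (k : Int) := by omega
    refine ⟨by positivity, bn[k], ?_, hc'⟩
    rw [Int.toNat_natCast, List.getElem?_eq_getElem hk]
  · rintro ⟨hx, row, hrow, hc⟩
    obtain ⟨hk, hv⟩ := List.getElem?_eq_some_iff.1 hrow
    refine ⟨((x.toNat : Int), bn[x.toNat]), ⟨x.toNat, hk, by simp⟩, c, hv ▸ hc, ?_⟩
    simp only [Prod.mk.injEq, true_and]
    omega

lemma moralize_alt_eq_applyAll (bn : List (List Int)) :
    moralize_alt bn = applyAll bn (WB bn) := by
  have h1 : ∀ (s : Int) (mg : List (List Int)),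
      (bnCols bn).keys.foldl (fun mg e =>
          if s != e && ((bnCols bn).getD s []).any
              (fun r => ((bnCols bn).getD e []).contains r)
          then setOne mg s e else mg) mg =
        applyAll mg (((bnCols bn).keys.filter (fun e =>
          s != e && ((bnCols bn).getD s []).any
            (fun r => ((bnCols bn).getD e []).contains r))).map (fun e => (s, e))) := by
    intro s mg
    rw [PySem.List.foldl_if_eq_foldl_filter, applyAll, List.foldl_map]
  show (bnCols bn).keys.foldl (fun mg s => (bnCols bn).keys.foldl (fun mg e =>
      if s != e && ((bnCols bn).getD s []).any
          (fun r => ((bnCols bn).getD e []).contains r)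
      then setOne mg s e else mg) mg) bn = _
  simp only [h1, foldl_applyAll]
  rfl

lemma mem_WA (bn : List (List Int)) (p : Int × Int) :
    p ∈ WA bn ↔ p.1 ≠ p.2 ∧ ∃ row ∈ bn, p.1 ∈ ones row ∧ p.2 ∈ ones row := by
  unfold WA
  simp only [List.mem_flatMap, List.mem_map, List.mem_filter, decide_eq_true_eq]
  constructor
  · rintro ⟨item, ⟨row, hrow, rfl⟩, s, hs, e, ⟨he, hne⟩, rfl⟩
    exact ⟨hne, row, hrow, hs, he⟩
  · rintro ⟨hne, row, hrow, hs, he⟩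
    exact ⟨ones row, ⟨row, hrow, rfl⟩, p.1, hs, p.2, ⟨he, hne⟩, rfl⟩

lemma mem_WB (bn : List (List Int)) (p : Int × Int) :
    p ∈ WB bn ↔ p.1 ∈ (bnCols bn).keys ∧ p.2 ∈ (bnCols bn).keys ∧ p.1 ≠ p.2 ∧
      ∃ x, x ∈ (bnCols bn).getD p.1 [] ∧ x ∈ (bnCols bn).getD p.2 [] := by
  unfold WB
  simp only [List.mem_flatMap, List.mem_map, List.mem_filter, Bool.and_eq_true, bne_iff_ne,
    ne_eq, List.any_eq_true, List.contains_iff_mem]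
  constructor
  · rintro ⟨s, hs, e, ⟨he, hne, x, hx1, hx2⟩, rfl⟩
    exact ⟨hs, he, hne, x, hx1, hx2⟩
  · rintro ⟨hs, he, hne, x, hx1, hx2⟩
    exact ⟨p.1, hs, p.2, ⟨he, hne, x, hx1, hx2⟩, rfl⟩

lemma mem_getD_bnCols (bn : List (List Int)) (c x : Int) :
    x ∈ (bnCols bn).getD c [] ↔ (c, x) ∈ cells bn := by
  rw [getD_bnCols]
  simp only [List.mem_map, List.mem_filter, beq_iff_eq]
  constructor
  · rintro ⟨q, ⟨hq, rfl⟩, rfl⟩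
    exact hq
  · intro h
    exact ⟨(c, x), ⟨h, rfl⟩, rfl⟩

lemma mem_keys_bnCols (bn : List (List Int)) (c : Int) :
    c ∈ (bnCols bn).keys ↔ ∃ x, (c, x) ∈ cells bn := by
  rw [keys_bnCols]
  simp only [PySem.Set.mem_ofList, List.mem_map]
  constructor
  · rintro ⟨q, hq, rfl⟩
    exact ⟨q.2, hq⟩
  · rintro ⟨x, hx⟩
    exact ⟨(c, x), hx, rfl⟩

lemma mem_WA_iff_mem_WB (bn : List (List Int)) (p : Int × Int) : p ∈ WA bn ↔ p ∈ WB bn := by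
  rw [mem_WA, mem_WB]
  constructor
  · rintro ⟨hne, row, hrow, hs, he⟩
    obtain ⟨k, hk⟩ := List.mem_iff_getElem?.1 hrow
    have hcs : (p.1, (k : Int)) ∈ cells bn := by
      rw [mem_cells]
      exact ⟨by positivity, row, by rwa [Int.toNat_natCast], hs⟩
    have hce : (p.2, (k : Int)) ∈ cells bn := by
      rw [mem_cells]
      exact ⟨by positivity, row, by rwa [Int.toNat_natCast], he⟩
    refine ⟨(mem_keys_bnCols ..).2 ⟨_, hcs⟩, (mem_keys_bnCols ..).2 ⟨_, hce⟩, hne, (k : Int),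
      (mem_getD_bnCols ..).2 hcs, (mem_getD_bnCols ..).2 hce⟩
  · rintro ⟨_, _, hne, x, hx1, hx2⟩
    obtain ⟨hx0, row1, hrow1, hs⟩ := (mem_cells ..).1 ((mem_getD_bnCols ..).1 hx1)
    obtain ⟨_, row2, hrow2, he⟩ := (mem_cells ..).1 ((mem_getD_bnCols ..).1 hx2)
    rw [hrow1] at hrow2
    obtain rfl : row1 = row2 := Option.some.inj hrow2
    exact ⟨hne, row1, List.mem_of_getElem? hrow1, hs, he⟩

lemma nonneg_WA (bn : List (List Int)) : ∀ p ∈ WA bn, 0 ≤ p.1 ∧ 0 ≤ p.2 := by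
  intro p hp
  obtain ⟨_, row, _, h1, h2⟩ := (mem_WA bn p).1 hp
  exact ⟨((mem_ones ..).1 h1).1, ((mem_ones ..).1 h2).1⟩

-- ===== VERDICT (by name: the statement is the Claim_ definition above) =====
theorem moralize_spec : Claim_equal_moralize := by
  intro bn _ _
  unfold Spec_moralize
  rw [moralize_eq_applyAll, moralize_alt_eq_applyAll]
  refine (mat_ext _ _ (by rw [length_applyAll, length_applyAll]) ?_)
  intro r c
  rw [entry_applyAll (WA bn) (nonneg_WA bn) bn r c,
      entry_applyAll (WB bn) (fun p hp => nonneg_WA bn p ((mem_WA_iff_mem_WB bn p).2 hp)) bn r c]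
  exact if_congr (mem_WA_iff_mem_WB bn _) rfl rfl
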